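-- pv_equiv track=rewrite | github.com/zaned897/cortex_LR_team | LOSSRUNS/app/test/NB_claims_policy_class.py | consecutive_elements
-- ===== SOURCE A (Python) =====
-- def consecutive_elements(string):
--     """Count the consecutive alphanumeric and digits
--     """
--
--     c_char, c_nums = 0, 0
--
--     for i in range(len(string) - 1):
--         if string[i].isdigit() and string[i+1].isdigit():
--             c_nums += 1
--         elif string[i].isalpha() and string[i+1].isalpha():
--             c_char += 1
--     return c_char, c_nums
-- ===== SOURCE B (Python) =====
-- from itertools import groupby
--
--
-- def consecutive_elements(string):
--     """Count the consecutive alphanumeric and digits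
--     (run-length version: each maximal run of L equal-class chars has L-1 adjacent pairs)
--     """
--
--     def cls(c):
--         if c.isdigit():
--             return 'd'
--         if c.isalpha():
--             return 'a'
--         return 'o'
--
--     c_char, c_nums = 0, 0
--     for k, g in groupby(string, key=cls):
--         run_len = sum(1 for _ in g)
--         if k == 'd':
--             c_nums += run_len - 1
--         elif k == 'a':
--             c_char += run_len - 1
--     return c_char, c_nums
-- ===== Notes on version B (the rewrite author's own statement) =====
-- stated objective: alternative
-- what changed: Replaced the index-based scan over all adjacent positions with an itertools.groupby run-length decomposition: classify each char as digit/alpha/other, split the string into maximal equal-class runs, and add length-1 pairs per digit or alpha run.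
import Mathlib
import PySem

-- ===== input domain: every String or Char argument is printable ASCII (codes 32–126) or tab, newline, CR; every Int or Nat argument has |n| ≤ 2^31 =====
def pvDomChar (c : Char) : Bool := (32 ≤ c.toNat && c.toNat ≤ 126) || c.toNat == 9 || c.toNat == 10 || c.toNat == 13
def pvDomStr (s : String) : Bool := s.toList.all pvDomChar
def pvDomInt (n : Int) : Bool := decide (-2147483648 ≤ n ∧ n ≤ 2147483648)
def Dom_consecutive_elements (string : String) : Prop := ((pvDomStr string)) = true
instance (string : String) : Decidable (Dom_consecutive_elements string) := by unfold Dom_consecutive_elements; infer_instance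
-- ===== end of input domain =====

-- B replaces A's adjacent-index scan by a groupby run-length decomposition (classify chars,
-- split into maximal equal-class runs, add length-1 pairs per digit/alpha run); same O(n) cost.


-- ===== PORT A =====
-- the loop body of A, over the character list cs at index i
def pvStepA (cs : List Char) (acc : Int × Int) (i : Int) : Int × Int :=
  if PySem.Chars.isdigit (PySem.List.pyGetD cs i ' ') &&
     PySem.Chars.isdigit (PySem.List.pyGetD cs (i + 1) ' ') then
    (acc.1, acc.2 + 1)
  else if PySem.Chars.isalpha (PySem.List.pyGetD cs i ' ') &&
          PySem.Chars.isalpha (PySem.List.pyGetD cs (i + 1) ' ') then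
    (acc.1 + 1, acc.2)
  else
    acc

def consecutive_elements (string : String) : Int × Int :=
  (PySem.List.pyRange 0 (PySem.Str.len string - 1) 1).foldl (pvStepA string.toList) (0, 0)

-- ===== PORT B =====
-- cls(c) from Source B
def pvCls (c : Char) : Char :=
  if PySem.Chars.isdigit c then 'd' else if PySem.Chars.isalpha c then 'a' else 'o'

-- itertools.groupby(string, key=cls) with each group already summed to its length:
-- pvRunsAux carries the current open run (class k, length n)
def pvRunsAux (k : Char) (n : Int) : List Char → List (Char × Int)
  | [] => [(k, n)]
  | c :: rest =>
      if pvCls c = k then pvRunsAux k (n + 1) rest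
      else (k, n) :: pvRunsAux (pvCls c) 1 rest

def pvRuns : List Char → List (Char × Int)
  | [] => []
  | c :: rest => pvRunsAux (pvCls c) 1 rest

-- the loop body of Source B: add run_len - 1 to the bucket named by the class
def pvStepB (acc : Int × Int) (r : Char × Int) : Int × Int :=
  if r.1 = 'd' then (acc.1, acc.2 + (r.2 - 1))
  else if r.1 = 'a' then (acc.1 + (r.2 - 1), acc.2)
  else acc

def consecutive_elements_alt (string : String) : Int × Int :=
  (pvRuns string.toList).foldl pvStepB (0, 0)

-- ===== PRECONDITION & SPEC =====
def Spec_consecutive_elements (string : String) (out : Int × Int) : Prop := out = consecutive_elements_alt string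
instance (string : String) (out : Int × Int) : Decidable (Spec_consecutive_elements string out) := by unfold Spec_consecutive_elements; infer_instance

-- ===== CLAIM (what is proved, stated in full; the proofs are below) =====
def Claim_equal_consecutive_elements : Prop := ∀ (string : String), Dom_consecutive_elements string → Spec_consecutive_elements string (consecutive_elements string)

-- ===== LEMMAS AND PROOFS =====

-- common reference: the pairwise step on two characters, and the structural pair fold
def pvStepC (acc : Int × Int) (x y : Char) : Int × Int :=
  if PySem.Chars.isdigit x && PySem.Chars.isdigit y then (acc.1, acc.2 + 1)
  else if PySem.Chars.isalpha x && PySem.Chars.isalpha y then (acc.1 + 1, acc.2)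
  else acc

def pvPairFold (acc : Int × Int) : List Char → Int × Int
  | [] => acc
  | [_] => acc
  | x :: y :: r => pvPairFold (pvStepC acc x y) (y :: r)

-- a char is never both a digit and a letter
theorem pv_digit_not_alpha (c : Char) (h : PySem.Chars.isdigit c = true) :
    PySem.Chars.isalpha c = false := by
  simp only [PySem.Chars.isdigit, PySem.Chars.isalpha, PySem.Chars.isupper, PySem.Chars.islower,
    Bool.and_eq_true, Bool.or_eq_false_iff, decide_eq_true_eq, Bool.and_eq_false_iff,
    decide_eq_false_iff_not] at *
  obtain ⟨h1, h2⟩ := h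
  exact ⟨Or.inl fun hh => absurd (le_trans hh h2) (by decide),
         Or.inl fun hh => absurd (le_trans hh h2) (by decide)⟩

-- ---- A-side: the index fold is the structural pair fold ----

theorem pvA_shift (t : List Char) (x : Char) (acc : Int × Int) (b : Int) :
    (PySem.List.pyRange 1 (b + 1) 1).foldl (pvStepA (x :: t)) acc
      = (PySem.List.pyRange 0 b 1).foldl (pvStepA t) acc := by
  rw [PySem.List.pyRange_one, PySem.List.pyRange_one, List.foldl_map, List.foldl_map]
  have hb : (b + 1 - 1).toNat = (b - 0).toNat := by omega
  rw [hb]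
  apply PySem.List.foldl_congr_mem
  intro a k _
  show pvStepA (x :: t) a (1 + ↑k) = pvStepA t a (0 + ↑k)
  have h2 : (1 : Int) + (k : Int) + 1 = ((k + 1 + 1 : Nat) : Int) := by push_cast; ring
  have h1 : (1 : Int) + (k : Int) = ((k + 1 : Nat) : Int) := by push_cast; ring
  have h3 : (0 : Int) + (k : Int) = ((k : Nat) : Int) := by ring
  have h4 : ((k : Nat) : Int) + 1 = ((k + 1 : Nat) : Int) := by push_cast; ring
  unfold pvStepA
  rw [h2, h1, h3, h4]
  simp only [PySem.List.pyGetD_natCast, List.getD_cons_succ]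

theorem pvA_eq_pairFold (cs : List Char) (acc : Int × Int) :
    (PySem.List.pyRange 0 ((cs.length : Int) - 1) 1).foldl (pvStepA cs) acc
      = pvPairFold acc cs := by
  induction cs generalizing acc with
  | nil => rw [PySem.List.pyRange_one_eq_nil (by simp)]; rfl
  | cons x tail ih =>
    cases tail with
    | nil => rw [PySem.List.pyRange_one_eq_nil (by simp)]; rfl
    | cons y r =>
      have hlen : ((x :: y :: r).length : Int) - 1 = ((y :: r).length : Int) := by
        simp
      rw [hlen]
      rw [show ((y :: r).length : Int) = (((y :: r).length : Int) - 1) + 1 from by omega]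
      rw [PySem.List.pyRange_one_cons (by simp only [List.length_cons]; push_cast; omega)]
      rw [List.foldl_cons]
      have hstep : pvStepA (x :: y :: r) acc 0 = pvStepC acc x y := by
        simp [pvStepA, pvStepC, PySem.List.pyGetD]
      rw [hstep, show (0 : Int) + 1 = 1 from by norm_num]
      rw [pvA_shift (y :: r) x (pvStepC acc x y) (((y :: r).length : Int) - 1)]
      rw [ih]
      rfl

-- ---- B-side: the run fold is the structural pair fold ----

-- pvStepB applied to a same-class next char extends the open run by one pair
theorem pvStepB_extend (acc : Int × Int) (p c : Char) (n : Int) (h : pvCls c = pvCls p) :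
    pvStepB acc (pvCls p, n + 1) = pvStepC (pvStepB acc (pvCls p, n)) p c := by
  by_cases hd : PySem.Chars.isdigit p
  · have hdc : PySem.Chars.isdigit c = true := by
      by_contra hc
      simp [pvCls, hd, Bool.of_not_eq_true hc] at h
      split at h <;> simp_all
    simp [pvCls, hd, pvStepB, pvStepC, hdc]
    ring
  · by_cases ha : PySem.Chars.isalpha p
    · have hcc : pvCls c = 'a' := by simpa [pvCls, hd, ha] using h
      have hac : PySem.Chars.isalpha c = true := by
        by_contra hc
        simp [pvCls, Bool.of_not_eq_true hc] at hcc
        split at hcc <;> simp_all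
      have hdc : PySem.Chars.isdigit c = false := by
        by_contra hc
        have := pv_digit_not_alpha c (by simpa using Bool.of_not_eq_false hc)
        simp_all
      simp [pvCls, ha, pvStepB, pvStepC, hac, hdc, Bool.of_not_eq_true hd]
      ring
    · -- class 'o': pvStepB ignores it, and p is neither digit nor alpha so pvStepC is identity
      have hp : pvCls p = 'o' := by simp [pvCls, hd, ha]
      simp [hp, pvStepB, pvStepC, Bool.of_not_eq_true hd, Bool.of_not_eq_true ha]

-- different classes: the boundary pair is not counted by pvStepC
theorem pvStepC_boundary (acc : Int × Int) (p c : Char) (h : pvCls c ≠ pvCls p) :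
    pvStepC acc p c = acc := by
  by_cases hdp : PySem.Chars.isdigit p <;> by_cases hdc : PySem.Chars.isdigit c
  · exact absurd (by simp [pvCls, hdp, hdc]) h
  · by_cases hap : PySem.Chars.isalpha p
    · have := pv_digit_not_alpha p hdp; simp_all
    · simp [pvStepC, Bool.of_not_eq_true hdc, Bool.of_not_eq_true hap]
  · by_cases hac : PySem.Chars.isalpha c
    · have := pv_digit_not_alpha c hdc; simp_all
    · simp [pvStepC, Bool.of_not_eq_true hdp, Bool.of_not_eq_true hac]
  · by_cases hap : PySem.Chars.isalpha p <;> by_cases hac : PySem.Chars.isalpha c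
    · exact absurd (by simp [pvCls, hap, hac, Bool.of_not_eq_true hdp, Bool.of_not_eq_true hdc]) h
    · simp [pvStepC, Bool.of_not_eq_true hdp, Bool.of_not_eq_true hac]
    · simp [pvStepC, Bool.of_not_eq_true hdp, Bool.of_not_eq_true hap]
    · simp [pvStepC, Bool.of_not_eq_true hdp, Bool.of_not_eq_true hap]

-- a run of length 1 contributes nothing
theorem pvStepB_one (acc : Int × Int) (k : Char) : pvStepB acc (k, 1) = acc := by
  simp [pvStepB]

theorem pvRunsAux_fold (rest : List Char) (p : Char) (n : Int) (acc : Int × Int) :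
    (pvRunsAux (pvCls p) n rest).foldl pvStepB acc
      = pvPairFold (pvStepB acc (pvCls p, n)) (p :: rest) := by
  induction rest generalizing p n acc with
  | nil => simp [pvRunsAux, pvPairFold]
  | cons c r ih =>
    by_cases h : pvCls c = pvCls p
    · rw [pvRunsAux, if_pos h, ← h, ih c (n + 1) acc, h]
      show pvPairFold (pvStepB acc (pvCls p, n + 1)) (c :: r)
        = pvPairFold (pvStepC (pvStepB acc (pvCls p, n)) p c) (c :: r)
      rw [pvStepB_extend acc p c n h]
    · rw [pvRunsAux, if_neg h, List.foldl_cons, ih c 1 _]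
      show pvPairFold (pvStepB (pvStepB acc (pvCls p, n)) (pvCls c, 1)) (c :: r)
        = pvPairFold (pvStepC (pvStepB acc (pvCls p, n)) p c) (c :: r)
      rw [pvStepB_one, pvStepC_boundary _ p c h]

theorem pvB_eq_pairFold (cs : List Char) :
    (pvRuns cs).foldl pvStepB (0, 0) = pvPairFold (0, 0) cs := by
  cases cs with
  | nil => rfl
  | cons c rest =>
    rw [pvRuns, pvRunsAux_fold rest c 1 (0, 0), pvStepB_one]

-- ===== VERDICT (by name: the statement is the Claim_ definition above) =====
theorem consecutive_elements_spec : Claim_equal_consecutive_elements := by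
  intro s _
  show consecutive_elements s = consecutive_elements_alt s
  unfold consecutive_elements consecutive_elements_alt
  rw [PySem.Str.len_eq, pvA_eq_pairFold, pvB_eq_pairFold]
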